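-- pv_equiv track=rewrite | github.com/m-tkach/ProjectEuler | [043] Sub-string divisibility/main.py | has_uni_digits
-- ===== SOURCE A (Python) =====
-- def has_uni_digits(x, size):
--     d = [0] * 10
--     for s in range(size):
--         z = x % 10
--         if d[z] != 0:
--             return False
--         d[z] += 1
--         x //= 10
--     return True
-- ===== SOURCE B (Python) =====
-- def has_uni_digits(x, size):
--     for i in range(size):
--         for j in range(i):
--             if (x // 10**i) % 10 == (x // 10**j) % 10:
--                 return False
--     return True
-- ===== Notes on version B (the rewrite author's own statement) =====
-- stated objective: alternative
-- what changed: Replaces A's single peel-off pass that marks seen digits in a count array by a brute-force pairwise check: nested loops over digit positions i>j compare the positionally extracted digits (x // 10**i) % 10 directly, with no digit list, no counter array and no running mutation of x.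
import Mathlib
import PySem

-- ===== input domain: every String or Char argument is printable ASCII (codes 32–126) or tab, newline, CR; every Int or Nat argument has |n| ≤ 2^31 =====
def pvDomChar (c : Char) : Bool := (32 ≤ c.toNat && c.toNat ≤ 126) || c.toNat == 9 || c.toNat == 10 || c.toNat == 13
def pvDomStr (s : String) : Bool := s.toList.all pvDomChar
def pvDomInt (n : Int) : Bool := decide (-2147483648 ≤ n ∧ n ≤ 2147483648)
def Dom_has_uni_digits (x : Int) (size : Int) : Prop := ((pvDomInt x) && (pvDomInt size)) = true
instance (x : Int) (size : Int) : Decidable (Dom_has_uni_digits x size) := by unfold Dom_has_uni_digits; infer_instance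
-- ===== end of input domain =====

-- B replaces A's single peel-off pass with a seen-digit count array by a brute-force pairwise check
-- comparing positionally extracted digits (x // 10**i) % 10 over nested index loops (objective: alternative).


-- ===== PORT A =====
-- the loop body of A: for each of the `size` iterations, take z = x % 10, early-return False
-- if d[z] is already nonzero, else set d[z] += 1 and x //= 10.
-- pyGetD/pySetD are exact here: z = x % 10 always satisfies 0 ≤ z < 10 = d.length, so the
-- Python indexing never raises.
def hudGo (x : Int) (d : List Int) : Nat → Bool
  | 0 => true
  | n + 1 =>
    let z := PySem.Int.mod x 10
    if PySem.List.pyGetD d z 0 ≠ 0 then false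
    else hudGo (PySem.Int.floordiv x 10) (PySem.List.pySetD d z (PySem.List.pyGetD d z 0 + 1)) n

def has_uni_digits (x : Int) (size : Int) : Bool :=
  hudGo x (List.replicate 10 0) size.toNat

-- ===== PORT B =====
-- inner loop 'for j in range(i): if (x // 10**i) % 10 == (x // 10**j) % 10: return False'.
-- i and j come from range(...) so they are ≥ 0; hence 10^i.toNat / 10^j.toNat is exactly 10**i / 10**j.
def hudInner (x : Int) (i : Int) : List Int → Bool
  | [] => true
  | j :: js =>
    if PySem.Int.mod (PySem.Int.floordiv x ((10:Int) ^ i.toNat)) 10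
        == PySem.Int.mod (PySem.Int.floordiv x ((10:Int) ^ j.toNat)) 10 then false
    else hudInner x i js

-- outer loop 'for i in range(size): ...' — an index counter i with fuel for the remaining
-- iterations (so the early `return False` stops evaluation, as in Python)
def hudOuter (x : Int) (i : Int) : Nat → Bool
  | 0 => true
  | n + 1 =>
    if hudInner x i (PySem.List.pyRange 0 i 1) then hudOuter x (i + 1) n else false

def has_uni_digits_alt (x : Int) (size : Int) : Bool :=
  hudOuter x 0 size.toNat

-- ===== PRECONDITION & SPEC =====
def Spec_has_uni_digits (x : Int) (size : Int) (out : Bool) : Prop := out = has_uni_digits_alt x size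
instance (x : Int) (size : Int) (out : Bool) : Decidable (Spec_has_uni_digits x size out) := by unfold Spec_has_uni_digits; infer_instance

-- ===== CLAIM (what is proved, stated in full; the proofs are below) =====
def Claim_equal_has_uni_digits : Prop := ∀ (x : Int) (size : Int), Dom_has_uni_digits x size → Spec_has_uni_digits x size (has_uni_digits x size)

-- ===== LEMMAS AND PROOFS =====

-- the list of the last n digits of x, as A peels them off
def dlist (x : Int) : Nat → List Int
  | 0 => []
  | n + 1 => PySem.Int.mod x 10 :: dlist (PySem.Int.floordiv x 10) n

-- the digit B extracts positionally
def digit (x : Int) (i : Nat) : Int :=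
  PySem.Int.mod (PySem.Int.floordiv x ((10:Int) ^ i)) 10

lemma mem_dlist_bounds {x : Int} {n : Nat} {w : Int} (h : w ∈ dlist x n) : 0 ≤ w ∧ w < 10 := by
  induction n generalizing x with
  | zero => simp [dlist] at h
  | succ n ih =>
    simp only [dlist, List.mem_cons] at h
    rcases h with h | h
    · subst h
      exact ⟨PySem.Int.mod_nonneg x (by norm_num), PySem.Int.mod_lt x (by norm_num)⟩
    · exact ih h

lemma hudGo_iff (n : Nat) (x : Int) (d : List Int) (hlen : d.length = 10)
    (hnn : ∀ k : Nat, 0 ≤ d.getD k 0) :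
    hudGo x d n = true ↔ (dlist x n).Nodup ∧ ∀ w ∈ dlist x n, d.getD w.toNat 0 = 0 := by
  induction n generalizing x d with
  | zero => simp [hudGo, dlist]
  | succ n ih =>
    have hz0 : (0:Int) ≤ PySem.Int.mod x 10 := PySem.Int.mod_nonneg x (by norm_num)
    have hz10 : PySem.Int.mod x 10 < 10 := PySem.Int.mod_lt x (by norm_num)
    have hzn : (PySem.Int.mod x 10).toNat < d.length := by omega
    have hget : PySem.List.pyGetD d (PySem.Int.mod x 10) 0 = d.getD (PySem.Int.mod x 10).toNat 0 := by
      rw [PySem.List.pyGetD_eq_getElem d 0 hz0 (by omega)]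
      rw [List.getD_eq_getElem d 0 hzn]
    simp only [hudGo, hget, dlist]
    by_cases h : d.getD (PySem.Int.mod x 10).toNat 0 = 0
    · rw [h, PySem.List.pySetD_of_nonneg d _ hz0]
      simp only [ne_eq, not_true_eq_false, if_false, zero_add]
      have hset : ∀ k : Nat, (d.set (PySem.Int.mod x 10).toNat 1).getD k 0
          = if k = (PySem.Int.mod x 10).toNat then 1 else d.getD k 0 := by
        intro k
        rcases eq_or_ne k (PySem.Int.mod x 10).toNat with rfl | hk
        · rw [List.getD_eq_getElem _ 0 (by simpa using hzn),
              List.getElem_set_self (by simpa using hzn), if_pos rfl]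
        · rw [if_neg hk, List.getD_eq_getElem?_getD, List.getElem?_set_ne (Ne.symm hk),
              ← List.getD_eq_getElem?_getD]
      rw [ih _ _ (by simp [hlen]) (fun k => by rw [hset k]; split <;> [norm_num; exact hnn k])]
      simp only [hset]
      rw [List.nodup_cons]
      constructor
      · rintro ⟨hn, hall⟩
        refine ⟨⟨?_, hn⟩, fun w hw => ?_⟩
        · intro hmem
          have := hall _ hmem
          simp at this
        · rcases List.mem_cons.mp hw with rfl | hw
          · exact h
          · have := hall w hw
            split at this
            · exact absurd this (by norm_num)
            · exact this
      · rintro ⟨⟨hzmem, hn⟩, hall⟩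
        refine ⟨hn, fun w hw => ?_⟩
        rcases eq_or_ne w.toNat (PySem.Int.mod x 10).toNat with he | he
        · exfalso
          have hb := mem_dlist_bounds hw
          have : w = PySem.Int.mod x 10 := by omega
          exact hzmem (this ▸ hw)
        · rw [if_neg he]
          exact hall w (List.mem_cons_of_mem _ hw)
    · simp only [ne_eq, h, not_false_eq_true, if_true]
      constructor
      · intro hf; exact absurd hf (by simp)
      · rintro ⟨-, hall⟩
        exact absurd (hall _ (List.mem_cons_self)) h

lemma hudGo_eq_nodup (x : Int) (n : Nat) :
    hudGo x (List.replicate 10 0) n = decide (dlist x n).Nodup := by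
  have hrepl : ∀ k : Nat, (List.replicate 10 (0:Int)).getD k 0 = 0 := by
    intro k
    rcases lt_or_ge k 10 with hk | hk
    · rw [List.getD_eq_getElem _ 0 (by rw [List.length_replicate]; exact hk),
          List.getElem_replicate]
    · rw [List.getD_eq_default _ 0 (by rw [List.length_replicate]; exact hk)]
  have h := hudGo_iff n x (List.replicate 10 0) (by simp) (fun k => le_of_eq (hrepl k).symm)
  have h2 : (hudGo x (List.replicate 10 0) n = true) ↔ (dlist x n).Nodup := by
    rw [h]
    exact ⟨fun p => p.1, fun p => ⟨p, fun w _ => hrepl w.toNat⟩⟩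
  exact Bool.eq_iff_iff.mpr (by rw [h2]; simp)

-- peeling one digit shifts the positional extraction by one
lemma digit_floordiv (x : Int) (i : Nat) :
    digit (PySem.Int.floordiv x 10) i = digit x (i + 1) := by
  unfold digit
  congr 1
  have h1 : PySem.Int.floordiv x 10 = x / 10 :=
    PySem.Int.floordiv_eq_ediv_of_pos (by norm_num)
  have h2 : ∀ (y : Int) (k : Nat), PySem.Int.floordiv y ((10:Int) ^ k) = y / 10 ^ k := by
    intro y k
    exact PySem.Int.floordiv_eq_ediv_of_pos (by positivity)
  rw [h1, h2, h2, Int.ediv_ediv_of_nonneg (by norm_num : (0:Int) ≤ 10)]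
  congr 1
  rw [pow_succ, mul_comm]

lemma dlist_eq_map (x : Int) (n : Nat) :
    dlist x n = (List.range n).map (digit x) := by
  induction n generalizing x with
  | zero => rfl
  | succ n ih =>
    rw [dlist, ih, List.range_succ_eq_map, List.map_cons, List.map_map]
    congr 1
    · simp [digit]
    · exact List.map_congr_left fun i _ => by
        simp only [Function.comp_apply]; exact digit_floordiv x i

lemma hudInner_iff (x : Int) (i : Int) (js : List Int) :
    hudInner x i js = true ↔
      ∀ j ∈ js, digit x i.toNat ≠ digit x j.toNat := by
  induction js with
  | nil => simp [hudInner]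
  | cons j js ih =>
    simp only [hudInner, List.mem_cons]
    split
    · rename_i hx
      simp only [beq_iff_eq] at hx
      constructor
      · intro hf; exact absurd hf (by simp)
      · intro hall; exact absurd hx (hall j (Or.inl rfl))
    · rename_i hx
      simp only [beq_iff_eq] at hx
      rw [ih]
      constructor
      · rintro hall j' (rfl | hj')
        · exact hx
        · exact hall j' hj'
      · intro hall j' hj'; exact hall j' (Or.inr hj')

lemma hudOuter_iff (x : Int) (n : Nat) (i : Int) :
    hudOuter x i n = true ↔
      ∀ m ∈ PySem.List.pyRange i (i + n) 1, ∀ j ∈ PySem.List.pyRange 0 m 1,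
        digit x m.toNat ≠ digit x j.toNat := by
  induction n generalizing i with
  | zero =>
    simp only [Nat.cast_zero, add_zero, PySem.List.pyRange_one_eq_nil (le_refl i)]
    simp [hudOuter]
  | succ n ih =>
    have hcons : PySem.List.pyRange i (i + (n + 1 : Nat)) 1
        = i :: PySem.List.pyRange (i + 1) (i + (n + 1 : Nat)) 1 :=
      PySem.List.pyRange_one_cons (by push_cast; omega)
    have harg : i + ((n : Int) + 1) = (i + 1) + (n : Int) := by ring
    simp only [hudOuter, hcons, List.mem_cons]
    split
    · rename_i hin
      rw [hudInner_iff] at hin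
      rw [ih]
      push_cast
      rw [harg]
      constructor
      · rintro hall m (rfl | hm)
        · exact hin
        · exact hall m hm
      · intro hall m hm; exact hall m (Or.inr hm)
    · rename_i hin
      rw [hudInner_iff] at hin
      constructor
      · intro hf; exact absurd hf (by simp)
      · intro hall; exact absurd (hall i (Or.inl rfl)) hin

lemma nodup_dlist_iff (x : Int) (n : Nat) :
    (dlist x n).Nodup ↔ ∀ a b : Nat, a < b → b < n → digit x a ≠ digit x b := by
  rw [dlist_eq_map, List.Nodup, List.pairwise_map, List.pairwise_iff_getElem]
  simp only [List.length_range, List.getElem_range]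
  constructor
  · intro h a b hab hbn; exact h a b (by omega) hbn hab
  · intro h a b _ hbn hab; exact h a b hab hbn

-- ===== VERDICT (by name: the statement is the Claim_ definition above) =====
theorem has_uni_digits_spec : Claim_equal_has_uni_digits := by
  intro x size _
  unfold Spec_has_uni_digits has_uni_digits has_uni_digits_alt
  rw [hudGo_eq_nodup]
  rw [Bool.eq_iff_iff, decide_eq_true_eq, hudOuter_iff, nodup_dlist_iff, zero_add]
  constructor
  · intro h i hi j hj
    rw [PySem.List.mem_pyRange_one] at hi hj
    exact fun he => h j.toNat i.toNat (by omega) (by omega) he.symm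
  · intro h a b hab hbn he
    refine h b (?_) a (?_) he.symm
    · rw [PySem.List.mem_pyRange_one]; omega
    · rw [PySem.List.mem_pyRange_one]; omega
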